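-- pv_equiv track=rewrite | github.com/pypi-data/pypi-mirror-379 | packages/itaxotools-blastax/itaxotools_blastax-0.1.1-py3-none-any.whl/itaxotools/blastax/scafos.py | _get_ambiguity_character
-- ===== SOURCE A (Python) =====
-- from collections import Counter, defaultdict
-- from typing import Callable, Iterator, NamedTuple
--
-- GAP_CHARACTERS = "-?* "
--
-- AMBIGUITY_CODES = defaultdict(
--     list,
--     {
--         "A": "A",
--         "C": "C",
--         "G": "G",
--         "T": "T",
--         "R": "AG",
--         "K": "GT",
--         "S": "CG",
--         "Y": "CT",
--         "M": "AC",
--         "W": "AT",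
--         "B": "CGT",
--         "H": "ACT",
--         "D": "AGT",
--         "V": "ACG",
--         "N": "ACGT",
--     },
-- )
--
-- AMBIGUITY_REVERSE_CODES = defaultdict(
--     lambda: "N",
--     {v: k for k, v in AMBIGUITY_CODES.items()},
-- )
--
-- def _get_ambiguity_character(characters: Iterator[str]) -> str:
--     codes = set(char.upper() for char in characters)
--     if len(codes) == 1:
--         return codes.pop()
--     for gap in GAP_CHARACTERS:
--         codes.discard(gap)
--     codes = set(nucl for code in codes for nucl in AMBIGUITY_CODES[code])
--     if not codes:
--         return GAP_CHARACTERS[0]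
--     key = "".join(sorted(codes))
--     return AMBIGUITY_REVERSE_CODES[key.upper()]
-- ===== SOURCE B (Python) =====
-- # B: integer bitmask accumulator (A=1,C=2,G=4,T=8) with an int-keyed IUPAC table
-- # instead of A's set-building / gap-discard / sort / string-key reverse lookup.
-- GAP_CHARACTERS = "-?* "
--
-- _CODE_BITS = {
--     "A": 1, "C": 2, "G": 4, "T": 8,
--     "R": 5, "K": 12, "S": 6, "Y": 10, "M": 3, "W": 9,
--     "B": 14, "H": 11, "D": 13, "V": 7, "N": 15,
-- }
--
-- _MASK_TO_CODE = {
--     1: "A", 2: "C", 3: "M", 4: "G", 5: "R", 6: "S", 7: "V",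
--     8: "T", 9: "W", 10: "Y", 11: "H", 12: "K", 13: "D", 14: "B", 15: "N",
-- }
--
-- def _get_ambiguity_character(characters):
--     uppers = [char.upper() for char in characters]
--     if uppers and all(u == uppers[0] for u in uppers):
--         return uppers[0]
--     mask = 0
--     for u in uppers:
--         mask |= _CODE_BITS.get(u, 0)
--     return _MASK_TO_CODE.get(mask, GAP_CHARACTERS[0])
-- ===== Notes on version B (the rewrite author's own statement) =====
-- stated objective: alternative
-- what changed: B replaces A's set construction, gap discarding, nucleotide-set building, sort-and-join and string-keyed reverse lookup by a single pass that ORs a per-code 4-bit nucleotide mask (A=1,C=2,G=4,T=8) into an integer accumulator and finishes with one integer-keyed IUPAC table lookup (mask 0 falls back to the gap character).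
import Mathlib
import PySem

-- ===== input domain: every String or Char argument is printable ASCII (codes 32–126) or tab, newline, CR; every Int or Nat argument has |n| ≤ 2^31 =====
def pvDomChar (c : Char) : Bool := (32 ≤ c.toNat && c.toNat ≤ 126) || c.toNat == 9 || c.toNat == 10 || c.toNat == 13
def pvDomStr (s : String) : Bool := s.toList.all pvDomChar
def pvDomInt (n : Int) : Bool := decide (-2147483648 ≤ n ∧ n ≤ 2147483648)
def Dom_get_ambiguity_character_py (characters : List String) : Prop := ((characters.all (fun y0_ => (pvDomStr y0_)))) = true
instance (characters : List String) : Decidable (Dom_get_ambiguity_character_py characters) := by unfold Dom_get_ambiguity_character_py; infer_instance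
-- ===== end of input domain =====

-- B replaces A's set-building / gap-discard / sort / string-keyed reverse lookup by an
-- integer bitmask accumulator (A=1,C=2,G=4,T=8) and an int-keyed IUPAC table (objective: alternative).

-- ===== PORT A =====
def pvGapChars : List Char := ['-', '?', '*', ' ']

def pvAmbiguityCodes : PySem.Dict String String :=
  PySem.Dict.ofList [("A","A"),("C","C"),("G","G"),("T","T"),("R","AG"),("K","GT"),("S","CG"),
    ("Y","CT"),("M","AC"),("W","AT"),("B","CGT"),("H","ACT"),("D","AGT"),("V","ACG"),("N","ACGT")]

def pvRevCodes : PySem.Dict String String :=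
  PySem.Dict.ofList [("A","A"),("C","C"),("G","G"),("T","T"),("AG","R"),("GT","K"),("CG","S"),
    ("CT","Y"),("AC","M"),("AT","W"),("CGT","B"),("ACT","H"),("AGT","D"),("ACG","V"),("ACGT","N")]

def get_ambiguity_character_py (characters : List String) : String :=
  let codes : PySem.Set String := PySem.Set.ofList (characters.map (fun char => PySem.Str.upper char))
  if PySem.Set.len codes = 1 then
    codes.headD ""   -- codes.pop() on a singleton set: its unique element
  else
    let codes : PySem.Set String := pvGapChars.foldl (fun s gap => PySem.Set.discard s (String.ofList [gap])) codes
    let codes2 : PySem.Set Char :=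
      PySem.Set.ofList (codes.flatMap (fun code => (PySem.Dict.getD pvAmbiguityCodes code "").toList))
    if codes2 = [] then "-"
    else
      let key : String := String.ofList (PySem.List.sorted codes2 (fun x => x) false)
      PySem.Dict.getD pvRevCodes (PySem.Str.upper key) "N"

-- ===== PORT B =====
def pvCodeBits : PySem.Dict String Int :=
  PySem.Dict.ofList [("A",1),("C",2),("G",4),("T",8),("R",5),("K",12),("S",6),("Y",10),("M",3),
    ("W",9),("B",14),("H",11),("D",13),("V",7),("N",15)]

def pvMaskToCode : PySem.Dict Int String :=
  PySem.Dict.ofList [(1,"A"),(2,"C"),(3,"M"),(4,"G"),(5,"R"),(6,"S"),(7,"V"),(8,"T"),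
    (9,"W"),(10,"Y"),(11,"H"),(12,"K"),(13,"D"),(14,"B"),(15,"N")]

def get_ambiguity_character_py_alt (characters : List String) : String :=
  let uppers : List String := characters.map (fun char => PySem.Str.upper char)
  if uppers ≠ [] ∧ uppers.all (fun u => u == uppers.headD "") = true then
    uppers.headD ""
  else
    let mask : Int := uppers.foldl (fun m u => PySem.Int.bor m (PySem.Dict.getD pvCodeBits u 0)) 0
    PySem.Dict.getD pvMaskToCode mask "-"

-- ===== PRECONDITION & SPEC =====
def Spec_get_ambiguity_character_py (characters : List String) (out : String) : Prop := out = get_ambiguity_character_py_alt characters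
instance (characters : List String) (out : String) : Decidable (Spec_get_ambiguity_character_py characters out) := by unfold Spec_get_ambiguity_character_py; infer_instance

-- ===== CLAIM (what is proved, stated in full; the proofs are below) =====
def Claim_equal_get_ambiguity_character_py : Prop := ∀ (characters : List String), Dom_get_ambiguity_character_py characters → Spec_get_ambiguity_character_py characters (get_ambiguity_character_py characters)

-- ===== LEMMAS AND PROOFS =====

-- expansion of one (uppercased) code, as A computes it
def pvExpand (u : String) : List Char := (PySem.Dict.getD pvAmbiguityCodes u "").toList

-- 4-bit encoding of the four nucleotide flags (A=1, C=2, G=4, T=8)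
def pvEnc (a c g t : Bool) : Int :=
  (if a then 1 else 0) + (if c then 2 else 0) + (if g then 4 else 0) + (if t then 8 else 0)

lemma pv_codes_mk : pvAmbiguityCodes = PySem.Dict.mk [("A","A"),("C","C"),("G","G"),("T","T"),("R","AG"),("K","GT"),("S","CG"),
    ("Y","CT"),("M","AC"),("W","AT"),("B","CGT"),("H","ACT"),("D","AGT"),("V","ACG"),("N","ACGT")] := by rfl

lemma pv_bits_mk : pvCodeBits = PySem.Dict.mk [("A",1),("C",2),("G",4),("T",8),("R",5),("K",12),("S",6),("Y",10),("M",3),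
    ("W",9),("B",14),("H",11),("D",13),("V",7),("N",15)] := by rfl

-- B's per-code bits are exactly the 4-bit encoding of A's per-code expansion
set_option maxHeartbeats 1000000 in
set_option maxRecDepth 10000 in
lemma pv_bits_eq (u : String) :
    PySem.Dict.getD pvCodeBits u 0 =
      pvEnc (decide ('A' ∈ pvExpand u)) (decide ('C' ∈ pvExpand u))
            (decide ('G' ∈ pvExpand u)) (decide ('T' ∈ pvExpand u)) := by
  by_cases h0 : ("A" == u) = true
  · have e := eq_of_beq h0; subst e; decide
  by_cases h1 : ("C" == u) = true
  · have e := eq_of_beq h1; subst e; decide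
  by_cases h2 : ("G" == u) = true
  · have e := eq_of_beq h2; subst e; decide
  by_cases h3 : ("T" == u) = true
  · have e := eq_of_beq h3; subst e; decide
  by_cases h4 : ("R" == u) = true
  · have e := eq_of_beq h4; subst e; decide
  by_cases h5 : ("K" == u) = true
  · have e := eq_of_beq h5; subst e; decide
  by_cases h6 : ("S" == u) = true
  · have e := eq_of_beq h6; subst e; decide
  by_cases h7 : ("Y" == u) = true
  · have e := eq_of_beq h7; subst e; decide
  by_cases h8 : ("M" == u) = true
  · have e := eq_of_beq h8; subst e; decide
  by_cases h9 : ("W" == u) = true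
  · have e := eq_of_beq h9; subst e; decide
  by_cases h10 : ("B" == u) = true
  · have e := eq_of_beq h10; subst e; decide
  by_cases h11 : ("H" == u) = true
  · have e := eq_of_beq h11; subst e; decide
  by_cases h12 : ("D" == u) = true
  · have e := eq_of_beq h12; subst e; decide
  by_cases h13 : ("V" == u) = true
  · have e := eq_of_beq h13; subst e; decide
  by_cases h14 : ("N" == u) = true
  · have e := eq_of_beq h14; subst e; decide
  simp only [pvExpand, pv_codes_mk, pv_bits_mk, PySem.Dict.getD, PySem.Dict.get?_mk_cons, if_neg h0, if_neg h1, if_neg h2, if_neg h3, if_neg h4, if_neg h5, if_neg h6, if_neg h7, if_neg h8, if_neg h9, if_neg h10, if_neg h11, if_neg h12, if_neg h13, if_neg h14]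
  simp [PySem.Dict.get?, pvEnc]

-- every expanded nucleotide is one of A, C, G, T
set_option maxHeartbeats 1000000 in
set_option maxRecDepth 10000 in
lemma pv_expand_sub (u : String) : ∀ n ∈ pvExpand u, n ∈ (['A','C','G','T'] : List Char) := by
  by_cases h0 : ("A" == u) = true
  · have e := eq_of_beq h0; subst e
    intro n hn; rw [(by decide : pvExpand "A" = ['A'])] at hn; fin_cases hn <;> decide
  by_cases h1 : ("C" == u) = true
  · have e := eq_of_beq h1; subst e
    intro n hn; rw [(by decide : pvExpand "C" = ['C'])] at hn; fin_cases hn <;> decide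
  by_cases h2 : ("G" == u) = true
  · have e := eq_of_beq h2; subst e
    intro n hn; rw [(by decide : pvExpand "G" = ['G'])] at hn; fin_cases hn <;> decide
  by_cases h3 : ("T" == u) = true
  · have e := eq_of_beq h3; subst e
    intro n hn; rw [(by decide : pvExpand "T" = ['T'])] at hn; fin_cases hn <;> decide
  by_cases h4 : ("R" == u) = true
  · have e := eq_of_beq h4; subst e
    intro n hn; rw [(by decide : pvExpand "R" = ['A','G'])] at hn; fin_cases hn <;> decide
  by_cases h5 : ("K" == u) = true
  · have e := eq_of_beq h5; subst e
    intro n hn; rw [(by decide : pvExpand "K" = ['G','T'])] at hn; fin_cases hn <;> decide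
  by_cases h6 : ("S" == u) = true
  · have e := eq_of_beq h6; subst e
    intro n hn; rw [(by decide : pvExpand "S" = ['C','G'])] at hn; fin_cases hn <;> decide
  by_cases h7 : ("Y" == u) = true
  · have e := eq_of_beq h7; subst e
    intro n hn; rw [(by decide : pvExpand "Y" = ['C','T'])] at hn; fin_cases hn <;> decide
  by_cases h8 : ("M" == u) = true
  · have e := eq_of_beq h8; subst e
    intro n hn; rw [(by decide : pvExpand "M" = ['A','C'])] at hn; fin_cases hn <;> decide
  by_cases h9 : ("W" == u) = true
  · have e := eq_of_beq h9; subst e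
    intro n hn; rw [(by decide : pvExpand "W" = ['A','T'])] at hn; fin_cases hn <;> decide
  by_cases h10 : ("B" == u) = true
  · have e := eq_of_beq h10; subst e
    intro n hn; rw [(by decide : pvExpand "B" = ['C','G','T'])] at hn; fin_cases hn <;> decide
  by_cases h11 : ("H" == u) = true
  · have e := eq_of_beq h11; subst e
    intro n hn; rw [(by decide : pvExpand "H" = ['A','C','T'])] at hn; fin_cases hn <;> decide
  by_cases h12 : ("D" == u) = true
  · have e := eq_of_beq h12; subst e
    intro n hn; rw [(by decide : pvExpand "D" = ['A','G','T'])] at hn; fin_cases hn <;> decide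
  by_cases h13 : ("V" == u) = true
  · have e := eq_of_beq h13; subst e
    intro n hn; rw [(by decide : pvExpand "V" = ['A','C','G'])] at hn; fin_cases hn <;> decide
  by_cases h14 : ("N" == u) = true
  · have e := eq_of_beq h14; subst e
    intro n hn; rw [(by decide : pvExpand "N" = ['A','C','G','T'])] at hn; fin_cases hn <;> decide
  simp only [pvExpand, pv_codes_mk, PySem.Dict.getD, PySem.Dict.get?_mk_cons, if_neg h0, if_neg h1, if_neg h2, if_neg h3, if_neg h4, if_neg h5, if_neg h6, if_neg h7, if_neg h8, if_neg h9, if_neg h10, if_neg h11, if_neg h12, if_neg h13, if_neg h14]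
  simp [PySem.Dict.get?]
lemma pv_enc_bor (a c g t a' c' g' t' : Bool) :
    PySem.Int.bor (pvEnc a c g t) (pvEnc a' c' g' t') = pvEnc (a || a') (c || c') (g || g') (t || t') := by
  revert a c g t a' c' g' t'; decide

lemma pv_mask_fold (l : List String) (a c g t : Bool) :
    l.foldl (fun m u => PySem.Int.bor m (PySem.Dict.getD pvCodeBits u 0)) (pvEnc a c g t) =
      pvEnc (a || l.any (fun u => decide ('A' ∈ pvExpand u)))
            (c || l.any (fun u => decide ('C' ∈ pvExpand u)))
            (g || l.any (fun u => decide ('G' ∈ pvExpand u)))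
            (t || l.any (fun u => decide ('T' ∈ pvExpand u))) := by
  induction l generalizing a c g t with
  | nil => simp
  | cons h tl ih =>
      rw [List.foldl_cons, pv_bits_eq, pv_enc_bor, ih]
      simp [Bool.or_assoc]

lemma pv_mask_fold0 (l : List String) :
    l.foldl (fun m u => PySem.Int.bor m (PySem.Dict.getD pvCodeBits u 0)) 0 =
      pvEnc (l.any (fun u => decide ('A' ∈ pvExpand u))) (l.any (fun u => decide ('C' ∈ pvExpand u)))
            (l.any (fun u => decide ('G' ∈ pvExpand u))) (l.any (fun u => decide ('T' ∈ pvExpand u))) := by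
  have h := pv_mask_fold l false false false false
  simpa using h

-- the singleton-set short-circuit: the two branch conditions agree
lemma pv_single_iff (l : List String) :
    PySem.Set.len (PySem.Set.ofList l) = 1 ↔ (l ≠ [] ∧ l.all (fun u => u == l.headD "") = true) := by
  cases l with
  | nil => simp [PySem.Set.len, PySem.Set.ofList_nil]
  | cons h t =>
      rw [PySem.Set.ofList_cons]
      simp only [PySem.Set.len, List.length_cons, List.all_cons, ne_eq, reduceCtorEq,
        not_false_iff, true_and, List.headD_cons, beq_self_eq_true, Bool.true_and,
        List.all_eq_true, beq_iff_eq]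
      constructor
      · intro hlen u hu
        have h0 : (PySem.Set.discard (PySem.Set.ofList t) h).length = 0 := by omega
        have hd : PySem.Set.discard (PySem.Set.ofList t) h = [] := List.length_eq_zero_iff.mp h0
        by_contra hne
        have : u ∈ PySem.Set.discard (PySem.Set.ofList t) h :=
          (PySem.Set.mem_discard _ _ _).mpr ⟨(PySem.Set.mem_ofList _ _).mpr hu, hne⟩
        simp [hd] at this
      · intro hall
        have hd : PySem.Set.discard (PySem.Set.ofList t) h = [] := by
          rw [List.eq_nil_iff_forall_not_mem]
          intro u hu
          rcases (PySem.Set.mem_discard _ _ _).mp hu with ⟨hmem, hne⟩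
          exact hne (hall u ((PySem.Set.mem_ofList _ _).mp hmem))
        simp [hd]

lemma pv_headD (l : List String) : (PySem.Set.ofList l).headD "" = l.headD "" := by
  cases l with
  | nil => rfl
  | cons h t => rw [PySem.Set.ofList_cons]; rfl

-- membership in A's gap-discarded code set
lemma pv_mem_codes (l : List String) (x : String) :
    x ∈ pvGapChars.foldl (fun s gap => PySem.Set.discard s (String.ofList [gap])) (PySem.Set.ofList l) ↔
      x ∈ l ∧ x ≠ "-" ∧ x ≠ "?" ∧ x ≠ "*" ∧ x ≠ " " := by
  show x ∈ PySem.Set.discard (PySem.Set.discard (PySem.Set.discard (PySem.Set.discard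
      (PySem.Set.ofList l) "-") "?") "*") " " ↔ _
  simp [PySem.Set.mem_discard, PySem.Set.mem_ofList, and_assoc]

-- membership in A's nucleotide set
lemma pv_mem_S (l : List String) (n : Char) :
    n ∈ PySem.Set.ofList ((pvGapChars.foldl (fun s gap => PySem.Set.discard s (String.ofList [gap])) (PySem.Set.ofList l)).flatMap
        (fun code => (PySem.Dict.getD pvAmbiguityCodes code "").toList)) ↔
      ∃ u ∈ l, n ∈ pvExpand u := by
  rw [PySem.Set.mem_ofList, List.mem_flatMap]
  constructor
  · rintro ⟨code, hcode, hn⟩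
    exact ⟨code, ((pv_mem_codes l code).mp hcode).1, hn⟩
  · rintro ⟨u, hu, hn⟩
    refine ⟨u, (pv_mem_codes l u).mpr ⟨hu, ?_, ?_, ?_, ?_⟩, hn⟩ <;>
      rintro rfl <;> rw [show pvExpand _ = [] from by decide] at hn <;> simp at hn

-- key step: A's sort-join-reverse-lookup equals B's mask lookup, for any nodup S ⊆ {A,C,G,T}
lemma pv_key_lookup (S : List Char) (hnd : S.Nodup) (hsub : ∀ n ∈ S, n ∈ (['A','C','G','T'] : List Char)) (hne : S ≠ []) :
    PySem.Dict.getD pvRevCodes (PySem.Str.upper (String.ofList (PySem.List.sorted S (fun x => x) false))) "N" =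
      PySem.Dict.getD pvMaskToCode
        (pvEnc (decide ('A' ∈ S)) (decide ('C' ∈ S)) (decide ('G' ∈ S)) (decide ('T' ∈ S))) "-" := by
  have hcan : PySem.List.sorted S (fun x => x) false =
      (['A','C','G','T'] : List Char).filter (fun n => decide (n ∈ S)) := by
    apply PySem.List.sorted_eq_of_perm_of_pairwise_lt
    · apply (List.perm_ext_iff_of_nodup (List.Nodup.filter _ (by decide)) hnd).mpr
      intro a
      simp only [List.mem_filter, decide_eq_true_eq]
      exact ⟨fun h => h.2, fun h => ⟨hsub a h, h⟩⟩
    · exact List.Pairwise.filter _ (by decide)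
  rw [hcan]
  by_cases hA : 'A' ∈ S <;> by_cases hC : 'C' ∈ S <;> by_cases hG : 'G' ∈ S <;> by_cases hT : 'T' ∈ S <;>
    simp only [hA, hC, hG, hT, List.filter, decide_true, decide_false] <;>
    first
      | decide
      | (exfalso; apply hne; rw [List.eq_nil_iff_forall_not_mem]; intro n hn
         have h := hsub n hn; fin_cases h <;> simp_all)

theorem pv_main (characters : List String) :
    get_ambiguity_character_py characters = get_ambiguity_character_py_alt characters := by
  simp only [get_ambiguity_character_py, get_ambiguity_character_py_alt]
  set U := characters.map (fun char => PySem.Str.upper char) with hU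
  by_cases hs : PySem.Set.len (PySem.Set.ofList U) = 1
  · rw [if_pos hs, if_pos ((pv_single_iff U).mp hs)]
    exact pv_headD U
  · rw [if_neg hs, if_neg (fun hc => hs ((pv_single_iff U).mpr hc))]
    set S := PySem.Set.ofList ((pvGapChars.foldl (fun s gap => PySem.Set.discard s (String.ofList [gap])) (PySem.Set.ofList U)).flatMap
        (fun code => (PySem.Dict.getD pvAmbiguityCodes code "").toList)) with hSdef
    have hany : ∀ c : Char, U.any (fun u => decide (c ∈ pvExpand u)) = decide (c ∈ S) := by
      intro c
      rw [Bool.eq_iff_iff]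
      simp only [List.any_eq_true, decide_eq_true_eq, hSdef]
      exact (pv_mem_S U c).symm
    rw [pv_mask_fold0]
    simp only [hany]
    by_cases hS : S = []
    · rw [if_pos hS]
      simp [hS, pvEnc]
      decide
    · rw [if_neg hS]
      exact pv_key_lookup S (PySem.Set.nodup_ofList _)
        (fun n hn => by
          rcases (pv_mem_S U n).mp (hSdef ▸ hn) with ⟨u, _, hmem⟩
          exact pv_expand_sub u n hmem) hS

-- ===== VERDICT (by name: the statement is the Claim_ definition above) =====
theorem get_ambiguity_character_py_spec : Claim_equal_get_ambiguity_character_py := by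
  intro characters _
  unfold Spec_get_ambiguity_character_py
  exact pv_main characters
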